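-- pv_equiv track=rewrite | github.com/styglab/formatid | services/api/app/services/health_service.py | _summarize_status
-- ===== SOURCE A (Python) =====
-- def _summarize_status(statuses: list[str]) -> str:
--     if not statuses:
--         return "down"
--     if any(status == "down" for status in statuses):
--         return "down"
--     if any(status == "degraded" for status in statuses):
--         return "degraded"
--     return "healthy"
-- ===== SOURCE B (Python) =====
-- def _summarize_status(statuses: list[str]) -> str:
--     if not statuses:
--         return "down"
--     severity = {"down": 2, "degraded": 1}
--     best = 0
--     for s in statuses:
--         best = max(best, severity.get(s, 0))
--     if best == 2:
--         return "down"
--     if best == 1: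
--         return "degraded"
--     return "healthy"
-- ===== Notes on version B (the rewrite author's own statement) =====
-- stated objective: alternative
-- what changed: Replaces the three sequential any()-membership scans with a single pass that folds a running maximum over a severity table (down=2, degraded=1, other=0) and reverse-maps the maximum to a label.
import Mathlib
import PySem

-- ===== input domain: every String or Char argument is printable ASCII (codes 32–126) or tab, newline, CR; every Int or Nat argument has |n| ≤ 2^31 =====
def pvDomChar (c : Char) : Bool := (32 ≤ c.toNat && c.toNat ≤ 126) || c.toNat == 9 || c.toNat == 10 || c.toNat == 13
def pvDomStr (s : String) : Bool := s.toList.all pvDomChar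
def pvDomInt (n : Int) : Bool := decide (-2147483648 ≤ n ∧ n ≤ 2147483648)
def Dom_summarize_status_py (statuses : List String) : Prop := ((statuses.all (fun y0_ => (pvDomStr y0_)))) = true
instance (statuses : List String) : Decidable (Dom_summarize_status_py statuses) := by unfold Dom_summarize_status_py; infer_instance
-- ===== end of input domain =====

-- B replaces A's three sequential any()-scans with one fold of a running maximum over a severity table; objective: alternative decomposition (same cost).

-- ===== PORT A =====
def summarize_status_py (statuses : List String) : String :=
  if statuses = [] then "down"
  else if statuses.any (fun status => status == "down") then "down"
  else if statuses.any (fun status => status == "degraded") then "degraded"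
  else "healthy"

-- ===== PORT B =====
-- severity.get(s, 0) with severity = {"down": 2, "degraded": 1}
def pvSeverity (s : String) : Nat :=
  PySem.Dict.getD (PySem.Dict.ofList [("down", 2), ("degraded", 1)]) s 0

def summarize_status_py_alt (statuses : List String) : String :=
  if statuses = [] then "down"
  else
    let best := statuses.foldl (fun best s => max best (pvSeverity s)) 0
    if best = 2 then "down"
    else if best = 1 then "degraded"
    else "healthy"

-- ===== PRECONDITION & SPEC =====
def Spec_summarize_status_py (statuses : List String) (out : String) : Prop := out = summarize_status_py_alt statuses
instance (statuses : List String) (out : String) : Decidable (Spec_summarize_status_py statuses out) := by unfold Spec_summarize_status_py; infer_instance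

-- ===== CLAIM (what is proved, stated in full; the proofs are below) =====
def Claim_equal_summarize_status_py : Prop := ∀ (statuses : List String), Dom_summarize_status_py statuses → Spec_summarize_status_py statuses (summarize_status_py statuses)

-- ===== LEMMAS AND PROOFS =====

-- the severity A's scan order assigns to a whole list
def pvSevList (l : List String) : Nat :=
  if l.any (fun s => s == "down") then 2
  else if l.any (fun s => s == "degraded") then 1
  else 0

theorem pvSeverity_eq (s : String) :
    pvSeverity s = if s == "down" then 2 else if s == "degraded" then 1 else 0 := by
  by_cases h1 : s = "down" <;> by_cases h2 : s = "degraded" <;>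
    simp [pvSeverity, PySem.Dict.getD, PySem.Dict.get?, PySem.Dict.ofList,
      PySem.Dict.update, PySem.Dict.insert, PySem.Dict.empty, h1, h2];
    simp [Ne.symm h1, Ne.symm h2]

theorem pvFold_eq (l : List String) (a : Nat) :
    l.foldl (fun best s => max best (pvSeverity s)) a = max a (pvSevList l) := by
  induction l generalizing a with
  | nil => simp [pvSevList]
  | cons s t ih =>
    simp only [List.foldl_cons, ih]
    rw [pvSevList, pvSevList]
    rw [pvSeverity_eq]
    by_cases h1 : s = "down" <;> by_cases h2 : s = "degraded" <;>
      by_cases h3 : t.any (fun s => s == "down") <;>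
        by_cases h4 : t.any (fun s => s == "degraded") <;>
          simp [h1, h2, h3, h4]

-- ===== VERDICT (by name: the statement is the Claim_ definition above) =====
theorem summarize_status_py_spec : Claim_equal_summarize_status_py := by
  intro statuses _
  unfold Spec_summarize_status_py summarize_status_py summarize_status_py_alt
  by_cases hnil : statuses = []
  · simp [hnil]
  · simp only [hnil, if_false]
    rw [pvFold_eq]
    simp only [Nat.zero_max]
    rw [pvSevList]
    by_cases h1 : statuses.any (fun s => s == "down") <;>
      by_cases h2 : statuses.any (fun s => s == "degraded") <;>
      simp [h1, h2]
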